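-- pv_equiv track=rewrite | github.com/rahulspsec/StockScreenerSite | StockScreenerSite/stockscreener/StockScreenerUtility/StockScreener.py | cum_pattern
-- ===== SOURCE A (Python) =====
-- def cum_pattern( data ):
--
--     prev = 0
--     out = []
--     for l in data:
--         new = l + prev if l*prev > 0 else l
--         out.append(new)
--         prev = new
--     return out
-- ===== SOURCE B (Python) =====
-- def cum_pattern(data):
--     # Partition data into maximal runs of same-sign nonzero elements (a zero is
--     # its own run), then emit each run's prefix sums.
--     if not data:
--         return []
--     x = data[0]
--     s = (x > 0) - (x < 0)
--     i = 1
--     while i < len(data) and data[i] != 0 and ((data[i] > 0) - (data[i] < 0)) == s: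
--         i += 1
--     run, rest = data[:i], data[i:]
--     out, total = [], 0
--     for v in run:
--         total += v
--         out.append(total)
--     return out + cum_pattern(rest)
-- ===== Notes on version B (the rewrite author's own statement) =====
-- stated objective: alternative
-- what changed: Replaces A's single fused scan carrying the running value across every element with a partition-then-prefix-sum recursion: split data into maximal same-sign runs (zeros are singleton runs) and concatenate each run's plain prefix sums.
import Mathlib
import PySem

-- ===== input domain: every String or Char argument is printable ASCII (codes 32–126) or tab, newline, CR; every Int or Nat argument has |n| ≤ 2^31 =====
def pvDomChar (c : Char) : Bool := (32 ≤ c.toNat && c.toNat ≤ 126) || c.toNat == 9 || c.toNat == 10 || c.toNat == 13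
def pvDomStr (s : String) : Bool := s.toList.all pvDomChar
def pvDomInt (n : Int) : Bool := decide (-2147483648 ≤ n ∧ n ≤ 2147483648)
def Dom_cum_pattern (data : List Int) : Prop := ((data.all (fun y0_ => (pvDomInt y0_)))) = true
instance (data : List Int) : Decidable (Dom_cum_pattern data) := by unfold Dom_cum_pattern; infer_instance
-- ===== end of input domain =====

-- B replaces A's fused running-value scan with a partition-into-same-sign-runs
-- plus per-run prefix sums recursion (alternative decomposition, same cost).


-- ===== PORT A =====
def cum_pattern (data : List Int) : List Int :=
  (data.foldl (fun (st : Int × List Int) l =>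
    let new := if l * st.1 > 0 then l + st.1 else l
    (new, st.2 ++ [new])) (0, [])).2

-- ===== PORT B =====
-- sign of x, Python's (x > 0) - (x < 0)
def pvSign (x : Int) : Int := (if x > 0 then (1 : Int) else 0) - (if x < 0 then 1 else 0)

-- the run-continuation test of Source B's while loop
def pvRunP (s y : Int) : Bool := decide (y ≠ 0) && decide (pvSign y = s)

-- prefix sums of a run (Source B's total/out loop), as a fold over the same state
def pvAccumFold (run : List Int) : List Int :=
  (run.foldl (fun (st : Int × List Int) v => (st.1 + v, st.2 ++ [st.1 + v])) (0, [])).2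

def cum_pattern_alt : List Int → List Int
  | [] => []
  | x :: xs =>
    let s := pvSign x
    let run := x :: xs.takeWhile (pvRunP s)
    let rest := xs.dropWhile (pvRunP s)
    pvAccumFold run ++ cum_pattern_alt rest
termination_by data => data.length
decreasing_by
  simpa using Nat.lt_succ_of_le (List.length_dropWhile_le _ _)

-- ===== PRECONDITION & SPEC =====
def Spec_cum_pattern (data : List Int) (out : List Int) : Prop := out = cum_pattern_alt data
instance (data : List Int) (out : List Int) : Decidable (Spec_cum_pattern data out) := by unfold Spec_cum_pattern; infer_instance

-- ===== CLAIM (what is proved, stated in full; the proofs are below) =====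
def Claim_equal_cum_pattern : Prop := ∀ (data : List Int), Dom_cum_pattern data → Spec_cum_pattern data (cum_pattern data)

-- ===== LEMMAS AND PROOFS =====

-- A's scan as a structural recursion carrying prev
def pvGo (prev : Int) : List Int → List Int
  | [] => []
  | l :: ls =>
    let new := if l * prev > 0 then l + prev else l
    new :: pvGo new ls

-- prefix sums starting from a total
def pvAccum (t : Int) : List Int → List Int
  | [] => []
  | v :: vs => (t + v) :: pvAccum (t + v) vs

theorem pvA_fold (data : List Int) : ∀ (p : Int) (acc : List Int),
    (data.foldl (fun (st : Int × List Int) l =>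
      let new := if l * st.1 > 0 then l + st.1 else l
      (new, st.2 ++ [new])) (p, acc)).2 = acc ++ pvGo p data := by
  induction data with
  | nil => intro p acc; simp [pvGo]
  | cons l ls ih => intro p acc; simp [pvGo, ih]

theorem pvCum_eq_go (data : List Int) : cum_pattern data = pvGo 0 data := by
  simpa using pvA_fold data 0 []

theorem pvAccumFold_eq (run : List Int) : ∀ (t : Int) (acc : List Int),
    (run.foldl (fun (st : Int × List Int) v => (st.1 + v, st.2 ++ [st.1 + v])) (t, acc)).2
      = acc ++ pvAccum t run := by
  induction run with
  | nil => intro t acc; simp [pvAccum]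
  | cons v vs ih => intro t acc; simp [pvAccum, ih]

theorem pvMul_pos_iff_sign (y p : Int) (hp : p ≠ 0) :
    y * p > 0 ↔ (y ≠ 0 ∧ pvSign y = pvSign p) := by
  simp only [pvSign]
  constructor
  · intro h
    rcases mul_pos_iff.mp h with ⟨hy, hpp⟩ | ⟨hy, hpp⟩ <;>
      refine ⟨by omega, ?_⟩ <;> split_ifs <;> omega
  · rintro ⟨hy, hs⟩
    split_ifs at hs <;>
      first
        | exact mul_pos (by omega) (by omega)
        | exact mul_pos_of_neg_of_neg (by omega) (by omega)
        | omega

theorem pvSign_add (y p : Int) (hp : p ≠ 0) (hy : y ≠ 0) (hs : pvSign y = pvSign p) :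
    pvSign (y + p) = pvSign p ∧ y + p ≠ 0 := by
  simp only [pvSign] at *
  split_ifs at * <;> omega

-- core run lemma: while elements continue prev's sign, A's scan is a prefix sum;
-- at the first break A's scan restarts as from prev = 0
theorem pvGo_run (xs : List Int) : ∀ (p : Int), p ≠ 0 →
    pvGo p xs = pvAccum p (xs.takeWhile (pvRunP (pvSign p)))
      ++ pvGo 0 (xs.dropWhile (pvRunP (pvSign p))) := by
  induction xs with
  | nil => intro p _; simp [pvGo, pvAccum]
  | cons y ys ih =>
    intro p hp
    by_cases hP : pvRunP (pvSign p) y = true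
    · have hc : y ≠ 0 ∧ pvSign y = pvSign p := by
        simpa [pvRunP] using hP
      have hmul : y * p > 0 := (pvMul_pos_iff_sign y p hp).mpr hc
      have hprev := pvSign_add y p hp hc.1 hc.2
      rw [List.takeWhile_cons_of_pos hP, List.dropWhile_cons_of_pos hP]
      simp only [pvGo, pvAccum, if_pos hmul]
      have := ih (y + p) hprev.2
      rw [hprev.1] at this
      simp [this, Int.add_comm]
    · have hc : y = 0 ∨ pvSign y ≠ pvSign p := by
        by_contra h
        rw [not_or, not_not] at h
        exact hP (by simp [pvRunP, h.1, h.2])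
      have hmul : ¬ y * p > 0 := fun h => by
        rcases (pvMul_pos_iff_sign y p hp).mp h with ⟨h1, h2⟩
        rcases hc with h | h <;> [exact h1 h; exact h h2]
      rw [List.takeWhile_cons_of_neg (by simpa using hP),
          List.dropWhile_cons_of_neg (by simpa using hP)]
      simp [pvGo, pvAccum, hmul]

theorem pvAlt_eq_go : ∀ (n : ℕ) (data : List Int), data.length ≤ n →
    cum_pattern_alt data = pvGo 0 data := by
  intro n
  induction n with
  | zero =>
    intro data h
    have : data = [] := by
      cases data with
      | nil => rfl
      | cons a l => simp at h
    simp [this, cum_pattern_alt, pvGo]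
  | succ n ih =>
    intro data h
    cases data with
    | nil => simp [cum_pattern_alt, pvGo]
    | cons x xs =>
      rw [cum_pattern_alt]
      have hrest : cum_pattern_alt (xs.dropWhile (pvRunP (pvSign x))) =
          pvGo 0 (xs.dropWhile (pvRunP (pvSign x))) := by
        apply ih
        have := List.length_dropWhile_le (pvRunP (pvSign x)) xs
        simp at h; omega
      rw [pvAccumFold, pvAccumFold_eq, hrest]
      by_cases hx : x = 0
      · -- zero head: the run is just [x] (pvRunP 0 y demands pvSign y = 0 ∧ y ≠ 0, impossible)
        have hnone : ∀ y, pvRunP (pvSign x) y = false := by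
          intro y
          subst hx
          simp only [pvRunP, pvSign]
          split_ifs <;> simp <;> omega
        have ht : xs.takeWhile (pvRunP (pvSign x)) = [] := by
          cases xs with
          | nil => rfl
          | cons a l => rw [List.takeWhile_cons_of_neg (by simp [hnone])]
        have hd : xs.dropWhile (pvRunP (pvSign x)) = xs := by
          cases xs with
          | nil => rfl
          | cons a l => rw [List.dropWhile_cons_of_neg (by simp [hnone])]
        rw [ht, hd] at *
        simp [pvGo, pvAccum, hx]
      · have := pvGo_run xs x hx
        simp [pvGo, pvAccum, this]

theorem pvAlt_eq_go' (data : List Int) : cum_pattern_alt data = pvGo 0 data :=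
  pvAlt_eq_go data.length data le_rfl

-- ===== VERDICT (by name: the statement is the Claim_ definition above) =====
theorem cum_pattern_spec : Claim_equal_cum_pattern := by
  intro data _
  unfold Spec_cum_pattern
  rw [pvCum_eq_go, pvAlt_eq_go']
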